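-- pv_equiv track=rewrite | github.com/loserrain/UVa-1 | 706/lc.py | print_7
-- ===== SOURCE A (Python) =====
-- def init_grid(s):
--     grid = []
--     for i in range(2*s + 3):
--         grid.append([' '] * (s+2))
--
--     return grid
--
-- def print_7(s):
--     grid = init_grid(s)
--     for i in [0]:
--         for j in range(1, s+1):
--             grid[i][j] = '-'
--
--     for i in range(1, s+1):
--         grid[i][-1] = '|'
--
--     for i in range(s+2, 2*s + 2):
--         grid[i][-1] = '|'
--
--     return grid
-- ===== SOURCE B (Python) =====
-- def print_7(s):
--     return [[('-' if i == 0 and 1 <= j <= s else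
--               '|' if j == s + 1 and (1 <= i <= s or s + 2 <= i <= 2 * s + 1) else
--               ' ')
--              for j in range(s + 2)]
--             for i in range(2 * s + 3)]
-- ===== Notes on version B (the rewrite author's own statement) =====
-- stated objective: simpler
-- what changed: B builds each cell directly from its (row, column) coordinates in one nested comprehension instead of allocating a blank grid and then patching it with three separate border-writing loops (and no init_grid helper).
import Mathlib
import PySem

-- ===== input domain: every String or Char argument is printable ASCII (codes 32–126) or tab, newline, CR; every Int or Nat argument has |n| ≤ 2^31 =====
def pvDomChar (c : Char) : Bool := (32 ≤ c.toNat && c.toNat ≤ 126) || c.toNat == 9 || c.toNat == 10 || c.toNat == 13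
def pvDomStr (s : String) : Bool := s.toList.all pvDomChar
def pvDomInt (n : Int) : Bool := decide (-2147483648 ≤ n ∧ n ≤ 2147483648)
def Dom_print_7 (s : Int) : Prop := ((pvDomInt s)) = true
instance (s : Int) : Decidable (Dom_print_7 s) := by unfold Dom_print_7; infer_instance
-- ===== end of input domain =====

-- B builds every cell directly from its coordinates in one nested pass; A allocates a blank
-- grid and patches it with three border loops.  A never raises, so there is no Pre_.

-- ===== PORT A =====
-- [' '] * (s+2) : Python list repetition gives the empty list for a non-positive count,
-- which is exactly List.replicate (s+2).toNat.
def init_grid (s : Int) : List (List String) :=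
  (PySem.List.pyRange 0 (2*s + 3)).foldl
    (fun grid _ => grid ++ [List.replicate (s + 2).toNat " "]) []

-- grid[i][j] = v is ported as the functional update pySetD/pyGetD; this is exact here because
-- every index A uses is in range on every input (the patch loops are empty whenever the grid
-- or a row could be too short), so Python never raises and pySetD's out-of-range default is dead.
def print_7 (s : Int) : List (List String) :=
  (PySem.List.pyRange (s + 2) (2*s + 2)).foldl (fun g i =>
      PySem.List.pySetD g i (PySem.List.pySetD (PySem.List.pyGetD g i []) (-1) "|"))
    ((PySem.List.pyRange 1 (s + 1)).foldl (fun g i =>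
        PySem.List.pySetD g i (PySem.List.pySetD (PySem.List.pyGetD g i []) (-1) "|"))
      (([(0 : Int)]).foldl (fun g i =>
          (PySem.List.pyRange 1 (s + 1)).foldl (fun g j =>
            PySem.List.pySetD g i (PySem.List.pySetD (PySem.List.pyGetD g i []) j "-")) g)
        (init_grid s)))

-- ===== PORT B =====
def print_7_alt (s : Int) : List (List String) :=
  (PySem.List.pyRange 0 (2*s + 3)).map (fun i =>
    (PySem.List.pyRange 0 (s + 2)).map (fun j =>
      if i = 0 ∧ 1 ≤ j ∧ j ≤ s then "-"
      else if j = s + 1 ∧ ((1 ≤ i ∧ i ≤ s) ∨ (s + 2 ≤ i ∧ i ≤ 2*s + 1)) then "|"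
      else " "))

-- ===== PRECONDITION & SPEC =====
def Spec_print_7 (s : Int) (out : List (List String)) : Prop := out = print_7_alt s
instance (s : Int) (out : List (List String)) : Decidable (Spec_print_7 s out) := by unfold Spec_print_7; infer_instance

-- ===== CLAIM (what is proved, stated in full; the proofs are below) =====
def Claim_equal_print_7 : Prop := ∀ (s : Int), Dom_print_7 s → Spec_print_7 s (print_7 s)

-- ===== LEMMAS AND PROOFS =====

-- Two lists are equal iff same length and same pyGetD at every Nat index below the length.
lemma list_eq_of_pyGetD {α : Type} (d : α) (xs ys : List α) (hlen : xs.length = ys.length)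
    (h : ∀ k : Nat, k < xs.length →
      PySem.List.pyGetD xs (↑k) d = PySem.List.pyGetD ys (↑k) d) : xs = ys := by
  apply List.ext_getElem hlen
  intro k h1 h2
  have hk := h k h1
  rw [PySem.List.pyGetD_eq_getElem xs d (by exact_mod_cast Nat.zero_le k) (by exact_mod_cast h1),
      PySem.List.pyGetD_eq_getElem ys d (by exact_mod_cast Nat.zero_le k) (by exact_mod_cast h2)] at hk
  simpa using hk

-- A loop writing rows F(row) at distinct in-range indices: length is preserved …
lemma length_foldl_set {α : Type} (d : α) (F : α → α) (L : List Int) (g : List α) :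
    (L.foldl (fun g i => PySem.List.pySetD g i (F (PySem.List.pyGetD g i d))) g).length
      = g.length := by
  induction L generalizing g with
  | nil => rfl
  | cons i L ih => simpa [PySem.List.length_pySetD] using ih (PySem.List.pySetD g i (F (PySem.List.pyGetD g i d)))

-- … and the resulting entry at k is F of the old entry iff k was visited.
lemma pyGetD_foldl_set {α : Type} (d : α) (F : α → α) (L : List Int) (g : List α)
    (hb : ∀ i ∈ L, 0 ≤ i ∧ i < (g.length : Int)) (hnd : L.Nodup) (k : Nat) (hk : k < g.length) :
    PySem.List.pyGetD (L.foldl (fun g i => PySem.List.pySetD g i (F (PySem.List.pyGetD g i d))) g) (↑k) d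
      = if (↑k : Int) ∈ L then F (PySem.List.pyGetD g (↑k) d) else PySem.List.pyGetD g (↑k) d := by
  induction L generalizing g with
  | nil => simp
  | cons i L ih =>
    obtain ⟨hi0, hil⟩ := hb i (List.mem_cons_self ..)
    have hitn : i = ((i.toNat : Nat) : Int) := (Int.toNat_of_nonneg hi0).symm
    have hiln : i.toNat < g.length := by omega
    set v := F (PySem.List.pyGetD g i d) with hv
    have hget : ∀ m : Nat, m < g.length →
        PySem.List.pyGetD (PySem.List.pySetD g i v) (↑m) d
          = if m = i.toNat then v else PySem.List.pyGetD g (↑m) d := by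
      intro m hm
      rw [hitn]
      exact PySem.List.pyGetD_pySetD_natCast g i.toNat m v d hiln
    have hlen' : (PySem.List.pySetD g i v).length = g.length := PySem.List.length_pySetD ..
    rw [List.foldl_cons, ih (PySem.List.pySetD g i v)
      (by intro j hj; have := hb j (List.mem_cons_of_mem _ hj); omega)
      (List.Nodup.of_cons hnd) (by omega)]
    by_cases hki : (↑k : Int) = i
    · have hkn : k = i.toNat := by omega
      have hknotL : (↑k : Int) ∉ L := by
        rw [hki]; exact (List.nodup_cons.mp hnd).1
      rw [if_neg hknotL, hget k hk, if_pos hkn, if_pos (by simp [hki]), hv, hki]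
    · have hkn : k ≠ i.toNat := by omega
      rw [hget k hk, if_neg hkn]
      simp [hki]

-- constant-value version (for the column loop writing '-')
lemma pyGetD_foldl_setconst {α : Type} (d v : α) (L : List Int) (g : List α)
    (hb : ∀ i ∈ L, 0 ≤ i ∧ i < (g.length : Int)) (hnd : L.Nodup) (k : Nat) (hk : k < g.length) :
    PySem.List.pyGetD (L.foldl (fun g i => PySem.List.pySetD g i v) g) (↑k) d
      = if (↑k : Int) ∈ L then v else PySem.List.pyGetD g (↑k) d := by
  simpa using pyGetD_foldl_set d (fun _ => v) L g hb hnd k hk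

-- the inner column loop of A's first patch loop commutes out of the grid
lemma foldl_colset {α : Type} (d : List α) (v : α) (i : Int) (L : List Int) (g : List (List α))
    (hi0 : 0 ≤ i) (hil : i < (g.length : Int)) :
    L.foldl (fun g j => PySem.List.pySetD g i (PySem.List.pySetD (PySem.List.pyGetD g i d) j v)) g
      = PySem.List.pySetD g i
          (L.foldl (fun r j => PySem.List.pySetD r j v) (PySem.List.pyGetD g i d)) := by
  induction L generalizing g with
  | nil =>
    simp only [List.foldl_nil]
    rw [PySem.List.pySetD_of_nonneg _ _ hi0,
        PySem.List.pyGetD_eq_getElem g d hi0 hil, List.set_getElem_self]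
  | cons j L ih =>
    have hiln : i.toNat < g.length := by omega
    set r1 := PySem.List.pySetD (PySem.List.pyGetD g i d) j v with hr1
    have hlen' : (PySem.List.pySetD g i r1).length = g.length := PySem.List.length_pySetD ..
    have hgr : PySem.List.pyGetD (PySem.List.pySetD g i r1) i d = r1 := by
      rw [show i = ((i.toNat : Nat) : Int) from (Int.toNat_of_nonneg hi0).symm]
      simpa using PySem.List.pyGetD_pySetD_natCast g i.toNat i.toNat r1 d hiln
    rw [List.foldl_cons, List.foldl_cons, ih (PySem.List.pySetD g i r1) (by omega), hgr,
        PySem.List.pySetD_of_nonneg _ _ hi0, PySem.List.pySetD_of_nonneg _ _ hi0, List.set_set,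
        PySem.List.pySetD_of_nonneg _ _ hi0]

-- pySetD at -1 on a nonempty row sets the last entry
lemma pySetD_neg_one {α : Type} (xs : List α) (v : α) (h : xs ≠ []) :
    PySem.List.pySetD xs (-1) v = xs.set (xs.length - 1) v := by
  have hl : 0 < xs.length := List.length_pos_iff.mpr h
  simp only [PySem.List.pySetD, PySem.List.pySet?, PySem.List.pyIdx?]
  have : ¬ (0:Int) ≤ -1 := by omega
  rw [if_neg this, if_pos (by omega : -(xs.length:Int) ≤ -1)]
  simp

-- a row characterised pointwise equals B's row
lemma row_eq (n : Nat) (i : Int) (ROW : List String)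
    (hlen : ROW.length = n+2)
    (hget : ∀ j : Nat, j < n+2 → PySem.List.pyGetD ROW (↑j) " "
        = if i = 0 ∧ 1 ≤ (j:Int) ∧ (j:Int) ≤ (n:Int) then "-"
          else if (j:Int) = (n:Int)+1 ∧ ((1 ≤ i ∧ i ≤ (n:Int)) ∨ ((n:Int)+2 ≤ i ∧ i ≤ 2*(n:Int)+1)) then "|"
          else " ") :
    ROW = (PySem.List.pyRange 0 ((n:Int)+2)).map (fun j =>
      if i = 0 ∧ 1 ≤ j ∧ j ≤ (n:Int) then "-"
      else if j = (n:Int)+1 ∧ ((1 ≤ i ∧ i ≤ (n:Int)) ∨ ((n:Int)+2 ≤ i ∧ i ≤ 2*(n:Int)+1)) then "|"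
      else " ") := by
  have hc : ((n:Int)+2) = ((n+2:Nat) : Int) := by push_cast; ring
  apply list_eq_of_pyGetD " "
  · rw [hlen, hc, PySem.List.pyRange_zero_natCast]; simp
  · intro j hj; rw [hlen] at hj
    rw [hget j hj, hc, PySem.List.pyGetD_map_pyRange _ (n+2) j " " hj]

lemma pyGetD_blank (n : Nat) (j : Nat) :
    PySem.List.pyGetD (List.replicate (n+2) " ") (↑j) " " = " " := by
  rw [PySem.List.pyGetD_natCast]
  simp

theorem print_7_eq_alt (s : Int) : print_7 s = print_7_alt s := by
  rcases lt_or_ge s 0 with hneg | hpos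
  · by_cases h1 : s = -1
    · subst h1; rfl
    · have e1 : PySem.List.pyRange 0 (2*s+3) = [] := PySem.List.pyRange_one_eq_nil (by omega)
      have e2 : PySem.List.pyRange 1 (s+1) = [] := PySem.List.pyRange_one_eq_nil (by omega)
      have e3 : PySem.List.pyRange (s+2) (2*s+2) = [] := PySem.List.pyRange_one_eq_nil (by omega)
      simp [print_7, init_grid, print_7_alt, e1, e2, e3]
  obtain ⟨n, rfl⟩ := Int.eq_ofNat_of_zero_le hpos
  have hcastR : (2*(n:Int)+3) = ((2*n+3 : Nat) : Int) := by push_cast; ring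
  set blank : List String := List.replicate (n+2) " " with hblank
  set colL := PySem.List.pyRange 1 ((n:Int)+1) with hcolL
  set rowL3 := PySem.List.pyRange ((n:Int)+2) (2*(n:Int)+2) with hrowL3
  set dashRow := colL.foldl (fun r j => PySem.List.pySetD r j "-") blank with hdash
  set barRow := PySem.List.pySetD blank (-1) "|" with hbar
  have hblank_len : blank.length = n+2 := by rw [hblank]; simp
  have hbar_set : barRow = blank.set (n+1) "|" := by
    rw [hbar, pySetD_neg_one _ _ (by rw [hblank]; simp), hblank_len]
    norm_num
  -- the initial grid
  have hg0 : init_grid (↑n) = (PySem.List.pyRange 0 (2*(n:Int)+3)).map (fun _ => blank) := by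
    have ht : ((n:Int)+2).toNat = n+2 := by omega
    rw [init_grid, PySem.List.foldl_append_singleton_eq_map]
    simp only [ht, List.nil_append, hblank]
  have hg0_len : (init_grid (↑n)).length = 2*n+3 := by
    rw [hg0, hcastR, PySem.List.pyRange_zero_natCast]; simp
  have hg0_get : ∀ k : Nat, k < 2*n+3 → PySem.List.pyGetD (init_grid (↑n)) (↑k) [] = blank := by
    intro k hk
    rw [hg0, hcastR]
    exact PySem.List.pyGetD_map_pyRange _ (2*n+3) k [] hk
  -- loop 1 (row 0, dashes)
  have hloop1 : ([(0 : Int)]).foldl (fun g i =>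
        colL.foldl (fun g j =>
          PySem.List.pySetD g i (PySem.List.pySetD (PySem.List.pyGetD g i []) j "-")) g)
      (init_grid (↑n)) = PySem.List.pySetD (init_grid (↑n)) 0 dashRow := by
    simp only [List.foldl_cons, List.foldl_nil]
    rw [foldl_colset [] "-" 0 colL (init_grid (↑n)) (by omega) (by rw [hg0_len]; push_cast; omega)]
    have h00 : PySem.List.pyGetD (init_grid (↑n)) (0 : Int) [] = blank := by
      simpa using hg0_get 0 (by omega)
    rw [h00, hdash]
  set g1 := PySem.List.pySetD (init_grid (↑n)) 0 dashRow with hg1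
  have hg1_len : g1.length = 2*n+3 := by rw [hg1, PySem.List.length_pySetD, hg0_len]
  have hg1_get : ∀ k : Nat, k < 2*n+3 →
      PySem.List.pyGetD g1 (↑k) [] = if k = 0 then dashRow else blank := by
    intro k hk
    rw [hg1, show (0:Int) = ((0:Nat):Int) by simp,
        PySem.List.pyGetD_pySetD_natCast _ 0 k dashRow [] (by omega)]
    by_cases h : k = 0 <;> simp [h, hg0_get k hk]
  -- loop 2 (rows 1..n, bar)
  set g2 := colL.foldl (fun g i =>
      PySem.List.pySetD g i (PySem.List.pySetD (PySem.List.pyGetD g i []) (-1) "|")) g1 with hg2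
  have hg2_len : g2.length = 2*n+3 := by
    rw [hg2]
    exact (length_foldl_set [] (fun r => PySem.List.pySetD r (-1) "|") colL g1).trans hg1_len
  have hg2_get : ∀ k : Nat, k < 2*n+3 → PySem.List.pyGetD g2 (↑k) []
      = if (↑k:Int) ∈ colL then PySem.List.pySetD (PySem.List.pyGetD g1 (↑k) []) (-1) "|"
        else PySem.List.pyGetD g1 (↑k) [] := by
    intro k hk
    rw [hg2]
    exact pyGetD_foldl_set [] (fun r => PySem.List.pySetD r (-1) "|") colL g1
      (by intro i hi; rw [hcolL, PySem.List.mem_pyRange_one] at hi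
          refine ⟨by omega, ?_⟩; rw [hg1_len]; push_cast; omega)
      (PySem.List.nodup_pyRange_one _ _) k (by omega)
  -- loop 3 (rows n+2..2n+1, bar)
  set g3 := rowL3.foldl (fun g i =>
      PySem.List.pySetD g i (PySem.List.pySetD (PySem.List.pyGetD g i []) (-1) "|")) g2 with hg3
  have hg3_len : g3.length = 2*n+3 := by
    rw [hg3]
    exact (length_foldl_set [] (fun r => PySem.List.pySetD r (-1) "|") rowL3 g2).trans hg2_len
  have hg3_get : ∀ k : Nat, k < 2*n+3 → PySem.List.pyGetD g3 (↑k) []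
      = if (↑k:Int) ∈ rowL3 then PySem.List.pySetD (PySem.List.pyGetD g2 (↑k) []) (-1) "|"
        else PySem.List.pyGetD g2 (↑k) [] := by
    intro k hk
    rw [hg3]
    exact pyGetD_foldl_set [] (fun r => PySem.List.pySetD r (-1) "|") rowL3 g2
      (by intro i hi; rw [hrowL3, PySem.List.mem_pyRange_one] at hi
          refine ⟨by omega, ?_⟩; rw [hg2_len]; push_cast; omega)
      (PySem.List.nodup_pyRange_one _ _) k (by omega)
  have hA : print_7 (↑n) = g3 := by
    rw [print_7, ← hcolL, ← hrowL3, hloop1]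
  -- B side
  have hB_len : (print_7_alt (↑n)).length = 2*n+3 := by
    rw [print_7_alt, hcastR, PySem.List.pyRange_zero_natCast]; simp
  have hB_get : ∀ k : Nat, k < 2*n+3 → PySem.List.pyGetD (print_7_alt (↑n)) (↑k) []
      = (PySem.List.pyRange 0 ((n:Int)+2)).map (fun j =>
          if (↑k:Int) = 0 ∧ 1 ≤ j ∧ j ≤ (n:Int) then "-"
          else if j = (n:Int)+1 ∧ ((1 ≤ (↑k:Int) ∧ (↑k:Int) ≤ (n:Int)) ∨ ((n:Int)+2 ≤ (↑k:Int) ∧ (↑k:Int) ≤ 2*(n:Int)+1)) then "|"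
          else " ") := by
    intro k hk
    rw [print_7_alt, hcastR]
    exact PySem.List.pyGetD_map_pyRange _ (2*n+3) k [] hk
  -- row-level facts
  have hbj : ∀ j : Nat, PySem.List.pyGetD blank (↑j) " " = " " := by
    intro j; rw [hblank]; exact pyGetD_blank n j
  have hdash_len : dashRow.length = n+2 := by
    rw [hdash]
    exact (length_foldl_set " " (fun _ => "-") colL blank).trans hblank_len
  have hdash_get : ∀ j : Nat, j < n+2 →
      PySem.List.pyGetD dashRow (↑j) " " = if (↑j:Int) ∈ colL then "-" else " " := by
    intro j hj
    rw [hdash, pyGetD_foldl_setconst " " "-" colL blank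
      (by intro i hi; rw [hcolL, PySem.List.mem_pyRange_one] at hi
          refine ⟨by omega, ?_⟩; rw [hblank_len]; push_cast; omega)
      (PySem.List.nodup_pyRange_one _ _) j (by omega)]
    by_cases h : (↑j:Int) ∈ colL <;> simp [h, hbj j]
  have hbar_len : barRow.length = n+2 := by rw [hbar_set]; simp [hblank_len]
  have hbar_get : ∀ j : Nat, j < n+2 →
      PySem.List.pyGetD barRow (↑j) " " = if j = n+1 then "|" else " " := by
    intro j hj
    rw [hbar_set, ← PySem.List.pySetD_natCast,
        PySem.List.pyGetD_pySetD_natCast blank (n+1) j "|" " " (by omega)]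
    by_cases h : j = n+1 <;> simp [h, hbj j]
  -- assemble
  rw [hA]
  apply list_eq_of_pyGetD ([] : List String) g3 (print_7_alt (↑n)) (by rw [hg3_len, hB_len])
  intro k hk
  rw [hg3_len] at hk
  have hmem2 : ((↑k:Int) ∈ colL) ↔ (1 ≤ k ∧ k ≤ n) := by
    rw [hcolL, PySem.List.mem_pyRange_one]; omega
  have hmem3 : ((↑k:Int) ∈ rowL3) ↔ (n+2 ≤ k ∧ k ≤ 2*n+1) := by
    rw [hrowL3, PySem.List.mem_pyRange_one]; omega
  rw [hg3_get k hk, hg2_get k hk, hg1_get k hk, hB_get k hk]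
  by_cases hk0 : k = 0
  · subst hk0
    rw [if_neg (by rw [hmem3]; omega), if_neg (by rw [hmem2]; omega), if_pos rfl]
    refine (row_eq n 0 dashRow hdash_len ?_).trans (by norm_num)
    intro j hj
    rw [hdash_get j hj]
    have hmc : ((↑j:Int) ∈ colL) ↔ (1 ≤ j ∧ j ≤ n) := by
      rw [hcolL, PySem.List.mem_pyRange_one]; omega
    simp only [hmc, true_and]
    split_ifs <;> first | rfl | omega
  · by_cases hkbar : (1 ≤ k ∧ k ≤ n) ∨ (n+2 ≤ k ∧ k ≤ 2*n+1)
    · have hval : (if (↑k:Int) ∈ rowL3 then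
            PySem.List.pySetD (if (↑k:Int) ∈ colL then
                PySem.List.pySetD (if k = 0 then dashRow else blank) (-1) "|"
              else if k = 0 then dashRow else blank) (-1) "|"
          else if (↑k:Int) ∈ colL then
              PySem.List.pySetD (if k = 0 then dashRow else blank) (-1) "|"
            else if k = 0 then dashRow else blank) = barRow := by
        rcases hkbar with h | h
        · rw [if_neg (by rw [hmem3]; omega), if_pos (hmem2.mpr h), if_neg hk0, hbar]
        · rw [if_pos (hmem3.mpr h), if_neg (by rw [hmem2]; omega), if_neg hk0, hbar]
      rw [hval]
      apply row_eq n (↑k) barRow hbar_len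
      intro j hj
      rw [hbar_get j hj]
      split_ifs <;> first | rfl | omega
    · have hval : (if (↑k:Int) ∈ rowL3 then
            PySem.List.pySetD (if (↑k:Int) ∈ colL then
                PySem.List.pySetD (if k = 0 then dashRow else blank) (-1) "|"
              else if k = 0 then dashRow else blank) (-1) "|"
          else if (↑k:Int) ∈ colL then
              PySem.List.pySetD (if k = 0 then dashRow else blank) (-1) "|"
            else if k = 0 then dashRow else blank) = blank := by
        rw [if_neg (by rw [hmem3]; omega), if_neg (by rw [hmem2]; omega), if_neg hk0]
      rw [hval]
      apply row_eq n (↑k) blank hblank_len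
      intro j hj
      rw [hbj j]
      split_ifs <;> first | rfl | omega

-- ===== VERDICT (by name: the statement is the Claim_ definition above) =====
theorem print_7_spec : Claim_equal_print_7 := by
  intro s _
  exact print_7_eq_alt s
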